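-- pv_equiv track=rewrite | github.com/SanchoPanso/Hackathon-beCoder-2022 | Final/find_bugmakers.py | find_bug_frequency
-- ===== SOURCE A (Python) =====
-- def find_bug_frequency(bugs: list) -> list:
--
--     bug_frequencies = {}
--
--     for bug in bugs:
--         author = bug['author']
--         file = bug['file']
--
--         if author not in bug_frequencies:
--             bug_frequencies[author] = {}
--
--         if file in bug_frequencies[author]:
--             bug_frequencies[author][file] += 1
--         else:
--             bug_frequencies[author][file] = 1
--
--     return bug_frequencies
-- ===== SOURCE B (Python) =====
-- def find_bug_frequency(bugs: list) -> list:
--     # Brute force: deduplicate keys first, then count each (author, file) pair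
--     # by scanning the flat pair list with list.count — no counting accumulator.
--     pairs = [(bug['author'], bug['file']) for bug in bugs]
--     return {
--         a: {f: pairs.count((a, f))
--             for f in dict.fromkeys(f2 for a2, f2 in pairs if a2 == a)}
--         for a in dict.fromkeys(a for a, _ in pairs)
--     }
-- ===== Notes on version B (the rewrite author's own statement) =====
-- stated objective: alternative
-- what changed: B keeps no counting accumulator at all: it flattens bugs to (author,file) pairs, deduplicates authors and per-author files preserving first appearance, and computes each count independently by rescanning the pair list with list.count, instead of A's single pass that increments a nested dict in place.
import Mathlib
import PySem

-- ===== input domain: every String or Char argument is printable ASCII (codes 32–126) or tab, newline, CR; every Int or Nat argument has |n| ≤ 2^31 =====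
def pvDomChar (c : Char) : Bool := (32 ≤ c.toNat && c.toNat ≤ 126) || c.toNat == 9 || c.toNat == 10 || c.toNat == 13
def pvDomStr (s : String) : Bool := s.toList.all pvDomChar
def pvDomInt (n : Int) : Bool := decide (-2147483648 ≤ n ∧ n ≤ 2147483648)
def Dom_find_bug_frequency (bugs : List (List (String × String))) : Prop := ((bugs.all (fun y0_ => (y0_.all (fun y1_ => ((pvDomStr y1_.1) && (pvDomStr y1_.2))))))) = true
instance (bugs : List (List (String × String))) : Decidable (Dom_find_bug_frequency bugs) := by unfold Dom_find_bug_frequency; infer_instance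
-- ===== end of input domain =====

-- B keeps no counting accumulator: it deduplicates (author, file) keys and computes each
-- count by rescanning the flat pair list (alternative decomposition, no speed claim).

-- bug['k'] on the association list: first match; Python's KeyError (no match) is excluded by Pre_,
-- so the "" default is never reached on admitted inputs.
def pvGetStr (bug : List (String × String)) (k : String) : String :=
  ((PySem.Dict.mk bug).get? k).getD ""

-- ===== PORT A =====
def find_bug_frequency (bugs : List (List (String × String))) : List (String × List (String × Int)) :=
  let bf : PySem.Dict String (PySem.Dict String Int) :=
    bugs.foldl (fun bf bug =>
      let author := pvGetStr bug "author"
      let file := pvGetStr bug "file"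
      let bf := if bf.contains author = false then bf.insert author PySem.Dict.empty else bf
      let inner := bf.getD author PySem.Dict.empty
      let inner :=
        if inner.contains file then inner.insert file (inner.getD file 0 + 1)
        else inner.insert file 1
      bf.insert author inner) PySem.Dict.empty
  bf.items.map (fun p => (p.1, p.2.items))

-- ===== PORT B =====
def find_bug_frequency_alt (bugs : List (List (String × String))) : List (String × List (String × Int)) :=
  let pairs := bugs.map (fun bug => (pvGetStr bug "author", pvGetStr bug "file"))
  (PySem.Set.ofList (pairs.map Prod.fst)).map (fun a =>
    (a, (PySem.Set.ofList ((pairs.filter (fun p => p.1 == a)).map Prod.snd)).map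
          (fun f => (f, (pairs.count (a, f) : Int)))))

-- ===== PRECONDITION & SPEC =====
-- Pre_ excludes exactly the inputs on which the Python raises KeyError: a bug dict missing
-- the key 'author' or 'file'.
def Pre_find_bug_frequency (bugs : List (List (String × String))) : Prop :=
  ∀ bug ∈ bugs, (PySem.Dict.mk bug).contains "author" = true ∧ (PySem.Dict.mk bug).contains "file" = true
instance (bugs : List (List (String × String))) : Decidable (Pre_find_bug_frequency bugs) := by unfold Pre_find_bug_frequency; infer_instance
def pvWitness_find_bug_frequency : (List (List (String × String))) :=
  ([[("author", "alice"), ("file", "main.py")], [("author", "bob"), ("file", "main.py")], [("author", "alice"), ("file", "main.py")]])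

def Spec_find_bug_frequency (bugs : List (List (String × String))) (out : List (String × List (String × Int))) : Prop := out = find_bug_frequency_alt bugs
instance (bugs : List (List (String × String))) (out : List (String × List (String × Int))) : Decidable (Spec_find_bug_frequency bugs out) := by unfold Spec_find_bug_frequency; infer_instance

-- ===== CLAIM (what is proved, stated in full; the proofs are below) =====
def Claim_equal_find_bug_frequency : Prop := ∀ (bugs : List (List (String × String))), Dom_find_bug_frequency bugs → Pre_find_bug_frequency bugs → Spec_find_bug_frequency bugs (find_bug_frequency bugs)

-- ===== LEMMAS AND PROOFS =====

-- the (author, file) key of one bug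
def pvKey (bug : List (String × String)) : String × String :=
  (pvGetStr bug "author", pvGetStr bug "file")

-- canonical form of A's loop body
def pvS (d : PySem.Dict String (PySem.Dict String Int)) (k : String × String) :
    PySem.Dict String (PySem.Dict String Int) :=
  d.insert k.1 ((d.getD k.1 PySem.Dict.empty).insert k.2 ((d.getD k.1 PySem.Dict.empty).getD k.2 0 + 1))

theorem pv_stepA_eq (d : PySem.Dict String (PySem.Dict String Int)) (bug : List (String × String)) :
    (let author := pvGetStr bug "author"
     let file := pvGetStr bug "file"
     let bf := if d.contains author = false then d.insert author PySem.Dict.empty else d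
     let inner := bf.getD author PySem.Dict.empty
     let inner :=
       if inner.contains file then inner.insert file (inner.getD file 0 + 1)
       else inner.insert file 1
     bf.insert author inner) = pvS d (pvKey bug) := by
  simp only [pvS, pvKey]
  set a := pvGetStr bug "author"
  set f := pvGetStr bug "file"
  by_cases ha : d.contains a = true
  · rw [if_neg (by simp [ha])]
    by_cases hf : (d.getD a PySem.Dict.empty).contains f = true
    · simp [hf]
    · have h0 : (d.getD a PySem.Dict.empty).getD f 0 = 0 :=
        PySem.Dict.getD_of_not_contains _ _ (by simpa using hf)
      simp [hf, h0]
  · have ha' : d.contains a = false := by simpa using ha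
    have hg : d.getD a PySem.Dict.empty = PySem.Dict.empty :=
      PySem.Dict.getD_of_not_contains _ _ ha'
    rw [if_pos ha', PySem.Dict.getD_insert_self, hg]
    simp [PySem.Dict.contains_empty, PySem.Dict.getD_empty, PySem.Dict.insert_insert_self]

theorem pv_getD_foldl_pvS (ps : List (String × String)) (d : PySem.Dict String (PySem.Dict String Int)) (a : String) :
    (ps.foldl pvS d).getD a PySem.Dict.empty =
      (ps.filter (fun p => p.1 == a)).foldl (fun i p => i.insert p.2 (i.getD p.2 0 + 1)) (d.getD a PySem.Dict.empty) := by
  induction ps generalizing d with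
  | nil => simp
  | cons p ps ih =>
    simp only [List.foldl_cons, ih, List.filter_cons]
    by_cases h : p.1 = a
    · subst h; simp [pvS, PySem.Dict.getD_insert_self]
    · have : (p.1 == a) = false := by simpa using h
      have h2 : (pvS d p).getD a PySem.Dict.empty = d.getD a PySem.Dict.empty := by
        simp [pvS, PySem.Dict.getD_insert, Ne.symm h]
      simp [this, h2]

theorem pv_count_snd_filter (ps : List (String × String)) (a f : String) :
    ((ps.filter (fun p => p.1 == a)).map Prod.snd).count f = ps.count (a, f) := by
  induction ps with
  | nil => simp
  | cons p ps ih =>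
    rw [List.filter_cons, List.count_cons]
    by_cases h1 : p.1 = a
    · simp only [h1, BEq.rfl, ite_true, List.map_cons, List.count_cons, ih]
      by_cases h2 : p.2 = f
      · have : (p == (a, f)) = true := by
          cases p; simp_all
        simp_all
      · have : (p == (a, f)) = false := by
          cases p; simp_all
        simp_all
    · have hb : (p.1 == a) = false := by simpa using h1
      have : (p == (a, f)) = false := by cases p; simp_all
      simp [hb, this, ih]

theorem pv_main (ps : List (String × String)) :
    (ps.foldl pvS PySem.Dict.empty).items.map (fun p => (p.1, p.2.items)) =
      (PySem.Set.ofList (ps.map Prod.fst)).map (fun a =>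
        (a, (PySem.Set.ofList ((ps.filter (fun p => p.1 == a)).map Prod.snd)).map
              (fun f => (f, (ps.count (a, f) : Int))))) := by
  have keysA : (ps.foldl pvS PySem.Dict.empty).keys = PySem.Set.ofList (ps.map Prod.fst) := by
    have h := PySem.Dict.keys_foldl_insert_key (ν := PySem.Dict String Int) ps Prod.fst
      (fun d k => ((d.getD k.1 PySem.Dict.empty).insert k.2 ((d.getD k.1 PySem.Dict.empty).getD k.2 0 + 1)))
      PySem.Dict.empty
    simpa [pvS, PySem.Dict.keys_empty, PySem.Set.update_nil_left] using h
  have hA : ∀ a, (ps.foldl pvS PySem.Dict.empty).getD a PySem.Dict.empty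
      = PySem.Dict.counter ((ps.filter (fun p => p.1 == a)).map Prod.snd) := by
    intro a
    rw [pv_getD_foldl_pvS, PySem.Dict.getD_empty,
      ← PySem.Dict.foldl_insert_getD_add_one_eq_counter, List.foldl_map]
  have nA : (ps.foldl pvS PySem.Dict.empty).keys.Nodup := by
    rw [keysA]; exact PySem.Set.nodup_ofList _
  rw [PySem.Dict.items_eq_map_keys _ nA PySem.Dict.empty, keysA, List.map_map]
  apply List.map_congr_left
  intro a _
  simp only [Function.comp]
  rw [hA a, PySem.Dict.items_counter]
  refine congrArg (Prod.mk a) ?_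
  apply List.map_congr_left
  intro f _
  rw [pv_count_snd_filter]

-- ===== VERDICT (by name: the statement is the Claim_ definition above) =====
theorem find_bug_frequency_spec : Claim_equal_find_bug_frequency := by
  intro bugs _ _
  unfold Spec_find_bug_frequency find_bug_frequency find_bug_frequency_alt
  have e1 : bugs.foldl (fun bf bug =>
      let author := pvGetStr bug "author"
      let file := pvGetStr bug "file"
      let bf := if bf.contains author = false then bf.insert author PySem.Dict.empty else bf
      let inner := bf.getD author PySem.Dict.empty
      let inner :=
        if inner.contains file then inner.insert file (inner.getD file 0 + 1)
        else inner.insert file 1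
      bf.insert author inner) PySem.Dict.empty
      = (bugs.map pvKey).foldl pvS PySem.Dict.empty := by
    rw [List.foldl_map]
    exact PySem.List.foldl_congr_mem _ _ _ _ (fun acc x _ => pv_stepA_eq acc x)
  have e2 : bugs.map (fun bug => (pvGetStr bug "author", pvGetStr bug "file")) = bugs.map pvKey := rfl
  simp only [e1, e2, pv_main]
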